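-- pv_equiv track=rewrite | github.com/chinlock/pythonteaching | final.py | lines_with_2words
-- ===== SOURCE A (Python) =====
-- STRIP_CHARS="?!.,;:"
--
-- def lines_with_2words(word1, word2, lines):
--   lineNumbers = []
--   for i in range(0, len(lines)):
--     words = lines[i].strip().split()
--     linewords=[]
--     for w in words:
--       k = w.strip(STRIP_CHARS)
--       linewords.append(k)
--     if word1 in linewords and word2 in linewords:
--       lineNumbers.append(i)
--   return lineNumbers
-- ===== SOURCE B (Python) =====
-- STRIP_CHARS = "?!.,;:"
--
-- def lines_containing(word, lines):
--   found = []
--   for i, line in enumerate(lines):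
--     if any(w.strip(STRIP_CHARS) == word for w in line.strip().split()):
--       found.append(i)
--   return found
--
-- def lines_with_2words(word1, word2, lines):
--   have2 = set(lines_containing(word2, lines))
--   return [i for i in lines_containing(word1, lines) if i in have2]
-- ===== Notes on version B (the rewrite author's own statement) =====
-- stated objective: alternative
-- what changed: B decomposes the task into two independent staged passes: a reusable helper computes, for each word separately, the sorted list of line indices containing it (using any() with early exit instead of materializing the cleaned-word list), and the result is the order-preserving intersection of the two index lists via a set; A makes one combined pass testing both words per line.
import Mathlib
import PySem

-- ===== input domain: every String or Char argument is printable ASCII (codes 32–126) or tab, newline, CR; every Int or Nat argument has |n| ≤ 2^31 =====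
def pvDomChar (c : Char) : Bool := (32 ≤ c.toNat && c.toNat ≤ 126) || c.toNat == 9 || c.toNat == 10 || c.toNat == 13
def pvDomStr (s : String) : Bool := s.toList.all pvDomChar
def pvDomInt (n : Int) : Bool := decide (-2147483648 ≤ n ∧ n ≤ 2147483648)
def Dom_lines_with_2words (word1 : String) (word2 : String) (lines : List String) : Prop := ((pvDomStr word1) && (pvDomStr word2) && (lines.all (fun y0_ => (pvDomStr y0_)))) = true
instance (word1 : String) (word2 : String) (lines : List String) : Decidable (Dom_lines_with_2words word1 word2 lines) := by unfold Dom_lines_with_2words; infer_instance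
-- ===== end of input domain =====

-- B restructures A into two independent staged passes: a helper computes each word's list of
-- line indices separately (any() with early exit, no cleaned-word list), and the result is the
-- order-preserving set intersection of the two index lists (alternative decomposition).


def STRIP_CHARS : String := "?!.,;:"

-- ===== PORT A =====
def lines_with_2words (word1 : String) (word2 : String) (lines : List String) : List Int :=
  (PySem.List.pyRange 0 (lines.length : Int) 1).foldl (fun lineNumbers i =>
    let words := PySem.Str.split₀ (PySem.Str.strip (PySem.List.pyGetD lines i ""))
    let linewords := words.foldl (fun lw w => lw ++ [PySem.Str.stripChars w STRIP_CHARS]) []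
    if linewords.contains word1 && linewords.contains word2 then lineNumbers ++ [i]
    else lineNumbers) []

-- ===== PORT B =====
-- helper of Source B: indices of the lines containing `word` (any() over the line's words)
def linesContaining (word : String) (lines : List String) : List Int :=
  (PySem.List.enumerate lines 0).foldl (fun found p =>
    if (PySem.Str.split₀ (PySem.Str.strip p.2)).any
        (fun w => PySem.Str.stripChars w STRIP_CHARS == word)
    then found ++ [p.1] else found) []

def lines_with_2words_alt (word1 : String) (word2 : String) (lines : List String) : List Int :=
  let have2 : PySem.Set Int := PySem.Set.ofList (linesContaining word2 lines)
  (linesContaining word1 lines).foldl (fun res i =>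
    if PySem.Set.contains have2 i then res ++ [i] else res) []

-- ===== PRECONDITION & SPEC =====
def Spec_lines_with_2words (word1 : String) (word2 : String) (lines : List String) (out : List Int) : Prop := out = lines_with_2words_alt word1 word2 lines
instance (word1 : String) (word2 : String) (lines : List String) (out : List Int) : Decidable (Spec_lines_with_2words word1 word2 lines out) := by unfold Spec_lines_with_2words; infer_instance

-- ===== CLAIM (what is proved, stated in full; the proofs are below) =====
def Claim_equal_lines_with_2words : Prop := ∀ (word1 : String) (word2 : String) (lines : List String), Dom_lines_with_2words word1 word2 lines → Spec_lines_with_2words word1 word2 lines (lines_with_2words word1 word2 lines)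

-- ===== LEMMAS AND PROOFS =====

-- the per-line test, as a predicate on the line index
def lineHas (word : String) (lines : List String) (i : Int) : Bool :=
  (PySem.Str.split₀ (PySem.Str.strip (PySem.List.pyGetD lines i ""))).any
    (fun w => PySem.Str.stripChars w STRIP_CHARS == word)

-- A's membership test on its materialized list of stripped words equals the any-test
theorem contains_map_strip (word : String) (ws : List String) :
    (ws.map (fun w => PySem.Str.stripChars w STRIP_CHARS)).contains word
      = ws.any (fun w => PySem.Str.stripChars w STRIP_CHARS == word) := by
  induction ws with
  | nil => rfl
  | cons w t ih =>
      simp only [List.map_cons, List.contains_cons, List.any_cons, ih,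
        BEq.comm (a := word) (b := PySem.Str.stripChars w STRIP_CHARS)]

-- A's per-line word-collecting fold is the map of stripChars
theorem foldl_strip_eq_map (ws : List String) :
    ws.foldl (fun lw w => lw ++ [PySem.Str.stripChars w STRIP_CHARS]) []
      = ws.map (fun w => PySem.Str.stripChars w STRIP_CHARS) := by
  simpa using PySem.List.foldl_append_singleton_eq_map
    (f := fun w => PySem.Str.stripChars w STRIP_CHARS) (l := ws) (acc := [])

-- B's helper is the filter of the index range by the per-line test
theorem linesContaining_eq (word : String) (lines : List String) :
    linesContaining word lines
      = (PySem.List.pyRange 0 (lines.length : Int) 1).filter (lineHas word lines) := by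
  unfold linesContaining
  rw [PySem.List.enumerate_eq_map_pyRange (d := ""), List.foldl_map]
  exact PySem.List.foldl_append_if_eq_filter (p := lineHas word lines)
    (l := PySem.List.pyRange 0 (lines.length : Int) 1) (acc := []) ▸ rfl

-- A is the filter of the index range by the conjunction of the two per-line tests
theorem portA_eq_filter (word1 word2 : String) (lines : List String) :
    lines_with_2words word1 word2 lines
      = (PySem.List.pyRange 0 (lines.length : Int) 1).filter
          (fun i => lineHas word1 lines i && lineHas word2 lines i) := by
  unfold lines_with_2words
  rw [PySem.List.foldl_congr_mem _ _
        (fun acc i => if lineHas word1 lines i && lineHas word2 lines i then acc ++ [i] else acc)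
        [] ?_]
  · rw [PySem.List.foldl_append_if_eq_filter, List.nil_append]
  · intro acc i _
    show (if ((PySem.Str.split₀ (PySem.Str.strip (PySem.List.pyGetD lines i ""))).foldl
            (fun lw w => lw ++ [PySem.Str.stripChars w STRIP_CHARS]) []).contains word1 &&
          ((PySem.Str.split₀ (PySem.Str.strip (PySem.List.pyGetD lines i ""))).foldl
            (fun lw w => lw ++ [PySem.Str.stripChars w STRIP_CHARS]) []).contains word2
        then acc ++ [i] else acc) = _
    rw [foldl_strip_eq_map, contains_map_strip, contains_map_strip]
    rfl

theorem lines_with_2words_spec : Claim_equal_lines_with_2words := by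
  intro word1 word2 lines _
  show lines_with_2words word1 word2 lines = lines_with_2words_alt word1 word2 lines
  unfold lines_with_2words_alt
  rw [portA_eq_filter, linesContaining_eq, linesContaining_eq]
  rw [PySem.List.foldl_append_if_eq_filter
        (p := fun i => PySem.Set.contains
          (PySem.Set.ofList ((PySem.List.pyRange 0 (lines.length : Int) 1).filter
            (lineHas word2 lines))) i)]
  rw [List.nil_append, List.filter_filter]
  apply List.filter_congr
  intro i hi
  have hset : PySem.Set.contains
      (PySem.Set.ofList ((PySem.List.pyRange 0 (lines.length : Int) 1).filter
        (lineHas word2 lines))) i = lineHas word2 lines i := by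
    by_cases h2 : lineHas word2 lines i = true
    · simp [PySem.Set.contains_eq_listContains, PySem.Set.mem_ofList, List.mem_filter, hi, h2]
    · simp only [Bool.not_eq_true] at h2
      simp [PySem.Set.contains_eq_listContains, PySem.Set.mem_ofList, List.mem_filter, h2]
  rw [hset, Bool.and_comm]
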